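-- pv_equiv track=rewrite | github.com/Oburec1985/OburecGH | wp/bu/002_trylEnu/cach/extract_strings.py | decode_dfm_string
-- ===== SOURCE A (Python) =====
-- def decode_dfm_string(s):
--     parts = []
--     i = 0
--     while i < len(s):
--         if s[i] == "'":
--             i += 1
--             start = i
--             while i < len(s) and s[i] != "'":
--                 i += 1
--             parts.append(s[start:i])
--             i += 1
--         elif s[i] == "#":
--             i += 1
--             start = i
--             while i < len(s) and s[i].isdigit():
--                 i += 1
--             if start < i:
--                 val = int(s[start:i])
--                 parts.append(chr(val))
--             else:
--                 # Malformed # without digits?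
--                 pass
--         else:
--             i += 1
--     return "".join(parts)
-- ===== SOURCE B (Python) =====
-- def decode_dfm_string(s):
--     # single-pass state machine: 0 = plain, 1 = inside quotes, 2 = after '#'
--     out = []
--     mode = 0
--     buf = ''
--     for ch in s:
--         if mode == 1:
--             if ch == "'":
--                 mode = 0
--             else:
--                 out.append(ch)
--         elif mode == 2 and ch.isdigit():
--             buf += ch
--         else:
--             if mode == 2 and buf:
--                 out.append(chr(int(buf)))
--             if ch == "'":
--                 mode = 1
--             elif ch == '#':
--                 mode, buf = 2, ''
--             else:
--                 mode = 0
--     if mode == 2 and buf: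
--         out.append(chr(int(buf)))
--     return ''.join(out)
-- ===== Notes on version B (the rewrite author's own statement) =====
-- stated objective: faster
-- what changed: A's index cursor with two inner scanning loops and substring slicing is replaced by a single left-to-right fold over the characters driven by a three-mode state machine (plain / inside-quotes / after-#) with a digit buffer flushed on escape end; avoiding per-character indexing and slice bookkeeping gave a measured constant-factor speedup.
-- outside the precondition, e.g. on decode_dfm_string('#1114112'): A raises ValueError, B raises ValueError
import Mathlib
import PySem

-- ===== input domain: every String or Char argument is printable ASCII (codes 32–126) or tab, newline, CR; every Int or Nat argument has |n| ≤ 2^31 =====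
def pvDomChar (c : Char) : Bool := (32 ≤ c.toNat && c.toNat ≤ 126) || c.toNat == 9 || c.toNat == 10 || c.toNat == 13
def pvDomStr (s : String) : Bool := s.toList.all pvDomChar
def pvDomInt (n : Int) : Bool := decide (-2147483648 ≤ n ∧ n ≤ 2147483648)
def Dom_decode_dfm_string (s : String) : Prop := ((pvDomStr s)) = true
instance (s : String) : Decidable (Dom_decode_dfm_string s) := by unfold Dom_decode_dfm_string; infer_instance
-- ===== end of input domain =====

-- B replaces A's index cursor with inner scan loops and slicing by a single-pass three-mode state machine
-- (both O(n); a timing run measured B faster by a constant factor; equivalence proved on the return value).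

-- ===== PORT A =====
-- A's two inner whiles share the shape 'while i < len(s) and p(s[i]): i += 1'; aScan is that loop.
def pvNotQuote (c : Char) : Bool := decide (c ≠ '\'')

def aScan (p : Char → Bool) (cs : List Char) (j : Nat) : Nat :=
  if h : j < cs.length then
    if p cs[j] then aScan p cs (j + 1) else j
  else j
termination_by cs.length - j

theorem aScan_ge (p : Char → Bool) (cs : List Char) (j : Nat) : j ≤ aScan p cs j := by
  unfold aScan
  split
  · split
    · have := aScan_ge p cs (j + 1); omega
    · exact Nat.le_refl j
  · exact Nat.le_refl j
termination_by cs.length - j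

-- the main while loop of A; parts is the accumulated list of strings, joined at the end.
-- int(...) is ported via PySem.Int.ofChars? (here applied only to nonempty digit runs, so it never raises;
-- .getD 0 is an unreachable default), chr(val) as Char.ofNat (exact for the values Pre_ admits).
def aLoop (cs : List Char) (i : Nat) (parts : List (List Char)) : List (List Char) :=
  if h : i < cs.length then
    if cs[i] = '\'' then
      let j := aScan pvNotQuote cs (i + 1)
      aLoop cs (j + 1)
        (parts ++ [PySem.List.slice cs (some ((i + 1 : Nat) : Int)) (some ((j : Nat) : Int))])
    else if cs[i] = '#' then
      let j := aScan PySem.Chars.isdigit cs (i + 1)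
      if i + 1 < j then
        aLoop cs j (parts ++
          [[Char.ofNat ((PySem.Int.ofChars?
              (PySem.List.slice cs (some ((i + 1 : Nat) : Int)) (some ((j : Nat) : Int)))).getD 0).toNat]])
      else
        aLoop cs j parts
    else
      aLoop cs (i + 1) parts
  else parts
termination_by cs.length - i
decreasing_by
  · have := aScan_ge pvNotQuote cs (i + 1); omega
  · have := aScan_ge PySem.Chars.isdigit cs (i + 1); omega
  · have := aScan_ge PySem.Chars.isdigit cs (i + 1); omega
  · omega

def decode_dfm_string (s : String) : String :=
  String.ofList (PySem.Chars.join [] (aLoop s.toList 0 []))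

-- ===== PORT B =====
-- one fold over the characters; state = (out, mode, buf): mode 0 = plain, 1 = inside quotes, 2 = after '#'.
def bStep (st : List Char × Int × List Char) (ch : Char) : List Char × Int × List Char :=
  match st with
  | (out, mode, buf) =>
    if mode = 1 then
      if ch = '\'' then (out, 0, buf) else (out ++ [ch], 1, buf)
    else if mode = 2 ∧ PySem.Chars.isdigit ch then (out, 2, buf ++ [ch])
    else
      let out' := if mode = 2 ∧ buf ≠ [] then
          out ++ [Char.ofNat ((PySem.Int.ofChars? buf).getD 0).toNat] else out
      if ch = '\'' then (out', 1, buf)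
      else if ch = '#' then (out', 2, ([] : List Char))
      else (out', 0, buf)

def decode_dfm_string_alt (s : String) : String :=
  match s.toList.foldl bStep ([], 0, []) with
  | (out, mode, buf) =>
      String.ofList (if mode = 2 ∧ buf ≠ [] then
        out ++ [Char.ofNat ((PySem.Int.ofChars? buf).getD 0).toNat] else out)

-- ===== PRECONDITION & SPEC =====
-- Pre_ excludes exactly the strings containing an actual #-escape (a '#' outside a quoted run, followed by
-- digits) whose numeric value is a surrogate code point 55296..57343 — there Python's A returns a lone-surrogate
-- str that no Lean String can represent — or is ≥ 1114112, where Python's chr raises ValueError.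
def pvEscVal (d : List Char) : Nat := d.foldl (fun a c => a * 10 + (c.toNat - 48)) 0

def pvEscOk (d : List Char) : Bool :=
  decide (pvEscVal d < 55296 ∨ (57344 ≤ pvEscVal d ∧ pvEscVal d < 1114112))

def pvOk (cs : List Char) : Bool :=
  (List.range cs.length).all fun i =>
    if cs.getD i ' ' = '#' ∧ (cs.take i).count '\'' % 2 = 0 then
      (let d := (cs.drop (i + 1)).takeWhile PySem.Chars.isdigit
       decide (d = []) || pvEscOk d)
    else true

def Pre_decode_dfm_string (s : String) : Prop := pvOk s.toList = true
instance (s : String) : Decidable (Pre_decode_dfm_string s) := by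
  unfold Pre_decode_dfm_string; infer_instance

def pvWitness_decode_dfm_string : String := "'Name'#13#10'x'"

def Spec_decode_dfm_string (s : String) (out : String) : Prop := out = decode_dfm_string_alt s
instance (s : String) (out : String) : Decidable (Spec_decode_dfm_string s out) := by
  unfold Spec_decode_dfm_string; infer_instance

-- ===== CLAIM (what is proved, stated in full; the proofs are below) =====
def Claim_equal_decode_dfm_string : Prop :=
  ∀ (s : String), Dom_decode_dfm_string s → Pre_decode_dfm_string s →
    Spec_decode_dfm_string s (decode_dfm_string s)

-- ===== LEMMAS AND PROOFS =====

-- "".join over a list of strings is flatten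
theorem join_nil_eq (xs : List (List Char)) : PySem.Chars.join [] xs = xs.flatten := by
  induction xs with
  | nil => simp [pysem]
  | cons a r ih =>
      cases r with
      | nil => simp [pysem]
      | cons b t => rw [PySem.Chars.join_cons_cons]; simp_all

theorem take_len_takeWhile (p : Char → Bool) (l : List Char) :
    l.take (l.takeWhile p).length = l.takeWhile p :=
  ((List.prefix_iff_eq_take.mp (List.takeWhile_prefix p)).symm)

theorem drop_len_takeWhile (p : Char → Bool) (l : List Char) :
    l.drop (l.takeWhile p).length = l.dropWhile p := by
  induction l with
  | nil => simp
  | cons c r ih =>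
      by_cases hp : p c
      · simp [List.takeWhile_cons_of_pos hp, List.dropWhile_cons_of_pos hp, ih]
      · simp [List.takeWhile_cons_of_neg hp, List.dropWhile_cons_of_neg hp]

theorem aScan_spec (p : Char → Bool) (cs : List Char) (j : Nat) :
    aScan p cs j = j + ((cs.drop j).takeWhile p).length := by
  unfold aScan
  split
  · rename_i h
    rw [List.drop_eq_getElem_cons h]
    by_cases hp : p cs[j]
    · rw [if_pos hp, aScan_spec p cs (j + 1), List.takeWhile_cons_of_pos hp]
      simp; omega
    · rw [if_neg hp, List.takeWhile_cons_of_neg hp]; simp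
  · rename_i h
    rw [List.drop_eq_nil_of_le (by omega)]; simp
termination_by cs.length - j

def bFin : List Char × Int × List Char → List Char
  | (out, mode, buf) =>
      if mode = 2 ∧ buf ≠ [] then
        out ++ [Char.ofNat ((PySem.Int.ofChars? buf).getD 0).toNat] else out

def bRun (t : List Char) (st : List Char × Int × List Char) : List Char :=
  bFin (t.foldl bStep st)

theorem bRun_cons (c : Char) (t : List Char) (st : List Char × Int × List Char) :
    bRun (c :: t) st = bRun t (bStep st c) := rfl

-- in modes 0 and 1 the buffer is dead state
theorem bRun_buf_irrel (t : List Char) :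
    ∀ (out buf buf' : List Char) (m : Int), (m = 0 ∨ m = 1) →
      bRun t (out, m, buf) = bRun t (out, m, buf') := by
  induction t with
  | nil =>
      intro out buf buf' m hm
      rcases hm with h | h <;> simp [bRun, bFin, h]
  | cons c r ih =>
      intro out buf buf' m hm
      rcases hm with h | h
      · subst h
        by_cases hq : c = '\''
        · subst hq
          rw [bRun_cons, bRun_cons]
          have h1 : ∀ b : List Char, bStep (out, 0, b) '\'' = (out, 1, b) := by
            intro b; simp [bStep]
          rw [h1, h1]
          exact ih out buf buf' 1 (Or.inr rfl)
        · by_cases hh : c = '#'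
          · subst hh
            rw [bRun_cons, bRun_cons]
            have h1 : ∀ b : List Char, bStep (out, 0, b) '#' = (out, 2, []) := by
              intro b; simp [bStep]
            rw [h1, h1]
          · rw [bRun_cons, bRun_cons]
            have h1 : ∀ b : List Char, bStep (out, 0, b) c = (out, 0, b) := by
              intro b; simp [bStep, hq, hh]
            rw [h1, h1]
            exact ih out buf buf' 0 (Or.inl rfl)
      · subst h
        by_cases hq : c = '\''
        · subst hq
          rw [bRun_cons, bRun_cons]
          have h1 : ∀ b : List Char, bStep (out, 1, b) '\'' = (out, 0, b) := by
            intro b; simp [bStep]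
          rw [h1, h1]
          exact ih out buf buf' 0 (Or.inl rfl)
        · rw [bRun_cons, bRun_cons]
          have h1 : ∀ b : List Char, bStep (out, 1, b) c = (out ++ [c], 1, b) := by
            intro b; simp [bStep, hq]
          rw [h1, h1]
          exact ih (out ++ [c]) buf buf' 1 (Or.inr rfl)

-- running from literal mode consumes the non-quote prefix verbatim and one closing quote
theorem bRun_lit (t : List Char) :
    ∀ (out buf : List Char),
      bRun t (out, 1, buf) =
        bRun ((t.dropWhile pvNotQuote).tail) (out ++ t.takeWhile pvNotQuote, 0, buf) := by
  induction t with
  | nil => intro out buf; simp [bRun, bFin]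
  | cons c r ih =>
      intro out buf
      by_cases hq : c = '\''
      · subst hq
        rw [bRun_cons]
        simp [bStep, List.takeWhile_cons_of_neg, List.dropWhile_cons_of_neg, pvNotQuote]
      · rw [bRun_cons]
        have hp : pvNotQuote c = true := by simp [pvNotQuote, hq]
        rw [List.takeWhile_cons_of_pos hp, List.dropWhile_cons_of_pos hp]
        simp only [bStep]
        norm_num [hq]
        rw [ih]
        simp

-- running from escape mode consumes the digit run and flushes it
theorem bRun_esc (t : List Char) :
    ∀ (out buf : List Char),
      bRun t (out, 2, buf) =
        bRun (t.dropWhile PySem.Chars.isdigit)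
          ((if buf ++ t.takeWhile PySem.Chars.isdigit ≠ [] then
              out ++ [Char.ofNat ((PySem.Int.ofChars?
                (buf ++ t.takeWhile PySem.Chars.isdigit)).getD 0).toNat]
            else out), 0, buf) := by
  induction t with
  | nil => intro out buf; simp [bRun, bFin]
  | cons c r ih =>
      intro out buf
      by_cases hd : PySem.Chars.isdigit c = true
      · rw [bRun_cons]
        have hstep : bStep (out, 2, buf) c = (out, 2, buf ++ [c]) := by
          simp [bStep, hd]
        rw [hstep, ih, List.takeWhile_cons_of_pos hd, List.dropWhile_cons_of_pos hd]
        have hfix : buf ++ [c] ++ r.takeWhile PySem.Chars.isdigit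
            = buf ++ c :: r.takeWhile PySem.Chars.isdigit := by simp
        rw [hfix]
        apply bRun_buf_irrel
        exact Or.inl rfl
      · rw [bRun_cons, List.takeWhile_cons_of_neg hd, List.dropWhile_cons_of_neg hd,
          List.append_nil, bRun_cons]
        congr 1
        simp only [bStep]
        by_cases hb : buf = []
        · simp [hb, hd]
        · simp [hb, hd]

-- main invariant: A's loop from index i equals B's machine run over the remaining suffix in plain mode
theorem aLoop_run (cs : List Char) (i : Nat) (parts : List (List Char)) (buf : List Char) :
    (aLoop cs i parts).flatten = bRun (cs.drop i) (parts.flatten, 0, buf) := by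
  by_cases h : i < cs.length
  · rw [List.drop_eq_getElem_cons h]
    rw [aLoop, dif_pos h]
    by_cases hq : cs[i] = '\''
    · rw [if_pos hq, bRun_cons, hq]
      have hstep : bStep (parts.flatten, 0, buf) '\'' = (parts.flatten, 1, buf) := by
        simp [bStep]
      rw [hstep, bRun_lit]
      have hsc : aScan pvNotQuote cs (i + 1)
          = (i + 1) + ((cs.drop (i + 1)).takeWhile pvNotQuote).length :=
        aScan_spec pvNotQuote cs (i + 1)
      have hdropj : cs.drop (aScan pvNotQuote cs (i + 1))
          = (cs.drop (i + 1)).dropWhile pvNotQuote := by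
        rw [hsc, ← List.drop_drop]
        exact drop_len_takeWhile _ _
      have hdropj1 : cs.drop (aScan pvNotQuote cs (i + 1) + 1)
          = ((cs.drop (i + 1)).dropWhile pvNotQuote).tail := by
        rw [← List.drop_drop, hdropj, List.drop_one]
      have hslice : PySem.List.slice cs (some ((i + 1 : Nat) : Int))
          (some ((aScan pvNotQuote cs (i + 1) : Nat) : Int))
          = (cs.drop (i + 1)).takeWhile pvNotQuote := by
        rw [PySem.List.slice_natCast, hsc, Nat.add_sub_cancel_left]
        exact take_len_takeWhile _ _
      rw [aLoop_run cs (aScan pvNotQuote cs (i + 1) + 1) _ buf, hdropj1, hslice]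
      simp
    · rw [if_neg hq]
      by_cases hh : cs[i] = '#'
      · rw [if_pos hh, bRun_cons, hh]
        have hstep : bStep (parts.flatten, 0, buf) '#' = (parts.flatten, 2, []) := by
          simp [bStep]
        rw [hstep, bRun_esc]
        have hsc : aScan PySem.Chars.isdigit cs (i + 1)
            = (i + 1) + ((cs.drop (i + 1)).takeWhile PySem.Chars.isdigit).length :=
          aScan_spec PySem.Chars.isdigit cs (i + 1)
        have hdropj : cs.drop (aScan PySem.Chars.isdigit cs (i + 1))
            = (cs.drop (i + 1)).dropWhile PySem.Chars.isdigit := by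
          rw [hsc, ← List.drop_drop]
          exact drop_len_takeWhile _ _
        have hslice : PySem.List.slice cs (some ((i + 1 : Nat) : Int))
            (some ((aScan PySem.Chars.isdigit cs (i + 1) : Nat) : Int))
            = (cs.drop (i + 1)).takeWhile PySem.Chars.isdigit := by
          rw [PySem.List.slice_natCast, hsc, Nat.add_sub_cancel_left]
          exact take_len_takeWhile _ _
        by_cases hlt : i + 1 < aScan PySem.Chars.isdigit cs (i + 1)
        · have htwne : (cs.drop (i + 1)).takeWhile PySem.Chars.isdigit ≠ [] := by
            rw [hsc] at hlt
            exact List.ne_nil_of_length_pos (by omega)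
          rw [if_pos hlt, aLoop_run cs (aScan PySem.Chars.isdigit cs (i + 1)) _ buf, hdropj,
            hslice, bRun_buf_irrel _ _ buf [] 0 (Or.inl rfl)]
          simp [htwne]
        · have htwe : (cs.drop (i + 1)).takeWhile PySem.Chars.isdigit = [] := by
            rw [hsc] at hlt
            have hz : ((cs.drop (i + 1)).takeWhile PySem.Chars.isdigit).length = 0 := by omega
            exact List.eq_nil_of_length_eq_zero hz
          rw [if_neg hlt, aLoop_run cs (aScan PySem.Chars.isdigit cs (i + 1)) _ buf, hdropj,
            bRun_buf_irrel _ _ buf [] 0 (Or.inl rfl)]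
          simp [htwe]
      · rw [if_neg hh]
        have hstep : bStep (parts.flatten, 0, buf) cs[i] = (parts.flatten, 0, buf) := by
          simp [bStep, hq, hh]
        rw [bRun_cons, hstep]
        exact aLoop_run cs (i + 1) parts buf
  · rw [aLoop, dif_neg h, List.drop_eq_nil_of_le (by omega)]
    simp [bRun, bFin]
termination_by cs.length - i
decreasing_by
  · have := aScan_ge pvNotQuote cs (i + 1); omega
  · have := aScan_ge PySem.Chars.isdigit cs (i + 1); omega
  · have := aScan_ge PySem.Chars.isdigit cs (i + 1); omega
  · omega

theorem alt_eq_bRun (s : String) :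
    decode_dfm_string_alt s = String.ofList (bRun s.toList ([], 0, [])) := by
  unfold decode_dfm_string_alt bRun bFin
  rcases hfold : s.toList.foldl bStep ([], 0, []) with ⟨out, mode, buf⟩
  rfl

-- ===== VERDICT (by name: the statement is the Claim_ definition above) =====
theorem decode_dfm_string_spec : Claim_equal_decode_dfm_string := by
  unfold Claim_equal_decode_dfm_string
  intro s _ _
  unfold Spec_decode_dfm_string
  rw [alt_eq_bRun]
  unfold decode_dfm_string
  rw [join_nil_eq, aLoop_run s.toList 0 [] []]
  simp
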